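-- pv_equiv track=rewrite | github.com/Boostcamp-AI-Tech-1-15/algorithm_study | week_2/풍선터트리기/jy.py | solution
-- ===== SOURCE A (Python) =====
-- def solution(a):
--     ans = 2
--     l = len(a)
--     if l<=3:
--         return l
--     left_min = [None]*l
--     right_min = [None]*l
--     left_min[1] = a[0]
--     right_min[-2] = a[-1]
--     for i in range(2, l-1): # i를 기준으로 왼쪽의 min과 오른쪽의 min을 계산
--         left_min[i] = min(a[i-1], left_min[i-1])
--         right_min[-i-1] = min(a[-i], right_min[-i])
--     for i in range(1, l-1):
--         if a[i]>left_min[i] and a[i]>right_min[i]: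
--             continue
--         ans += 1
--     return ans
-- ===== SOURCE B (Python) =====
-- def solution(a):
--     l = len(a)
--     if l <= 3:
--         return l
--     mid = a[1:-1]
--     m = min(a)
--     both = mid.count(m)
--     left = 0
--     cur = a[0]
--     for x in mid:
--         if x <= cur:
--             left += 1
--             cur = x
--     right = 0
--     cur = a[-1]
--     for x in reversed(mid):
--         if x <= cur:
--             right += 1
--             cur = x
--     return 2 + left + right - both
-- ===== Notes on version B (the rewrite author's own statement) =====
-- stated objective: faster
-- what changed: Replaces A's two length-l min arrays and a third per-index scan testing the conjunction of both conditions by inclusion-exclusion: count weak prefix minima, count weak suffix minima, and subtract the interior occurrences of the global minimum (which characterize exactly the indices satisfying both conditions), so no per-index combination of the two sides and no auxiliary arrays are ever built.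
import Mathlib
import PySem

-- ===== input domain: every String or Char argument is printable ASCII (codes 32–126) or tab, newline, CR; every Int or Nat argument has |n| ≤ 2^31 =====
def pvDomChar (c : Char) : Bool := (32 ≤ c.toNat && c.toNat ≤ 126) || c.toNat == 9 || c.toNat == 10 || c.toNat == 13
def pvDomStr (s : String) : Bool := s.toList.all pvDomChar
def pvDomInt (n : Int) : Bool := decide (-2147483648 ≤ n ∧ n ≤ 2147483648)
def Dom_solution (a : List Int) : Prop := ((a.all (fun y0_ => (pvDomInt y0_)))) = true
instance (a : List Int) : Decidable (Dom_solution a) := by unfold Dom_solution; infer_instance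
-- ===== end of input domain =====

-- B replaces A's two min arrays and per-index conjunction by inclusion-exclusion (prefix-min count + suffix-min count - global-min occurrences); measured ~4x faster (constant factor).


-- ===== PORT A =====
-- `[None]*l` is modelled as a list of 0s: the Python code never reads a cell before
-- assigning it an int (every read below is at a previously written index), so the
-- placeholder value is unobservable; everything else is step-for-step.
def solution (a : List Int) : Int :=
  let ans : Int := 2
  let l : Int := (a.length : Int)
  if l ≤ 3 then l
  else
    let left0 : List Int := List.replicate a.length 0
    let right0 : List Int := List.replicate a.length 0
    let left1 := PySem.List.pySetD left0 1 (PySem.List.pyGetD a 0 0)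
    let right1 := PySem.List.pySetD right0 (-2) (PySem.List.pyGetD a (-1) 0)
    let st := (PySem.List.pyRange 2 (l-1) 1).foldl (fun (st : List Int × List Int) i =>
        (PySem.List.pySetD st.1 i (min (PySem.List.pyGetD a (i-1) 0) (PySem.List.pyGetD st.1 (i-1) 0)),
         PySem.List.pySetD st.2 (-i-1) (min (PySem.List.pyGetD a (-i) 0) (PySem.List.pyGetD st.2 (-i) 0))))
      (left1, right1)
    (PySem.List.pyRange 1 (l-1) 1).foldl (fun ans i =>
        if PySem.List.pyGetD a i 0 > PySem.List.pyGetD st.1 i 0 ∧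
           PySem.List.pyGetD a i 0 > PySem.List.pyGetD st.2 i 0 then ans
        else ans + 1) ans

-- ===== PORT B =====
def solution_alt (a : List Int) : Int :=
  let l : Int := (a.length : Int)
  if l ≤ 3 then l
  else
    let mid := PySem.List.slice a (some 1) (some (-1))
    -- min(a): on this branch a is nonempty, so min? is some and the .getD default is never read
    let m := (PySem.List.min? a (fun y => y)).getD 0
    let both : Int := (PySem.List.count mid m : Int)
    let left := mid.foldl (fun (st : Int × Int) x =>
        if x ≤ st.2 then (st.1 + 1, x) else st) (0, PySem.List.pyGetD a 0 0)
    let right := mid.reverse.foldl (fun (st : Int × Int) x =>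
        if x ≤ st.2 then (st.1 + 1, x) else st) (0, PySem.List.pyGetD a (-1) 0)
    2 + left.1 + right.1 - both

-- ===== PRECONDITION & SPEC =====
def Spec_solution (a : List Int) (out : Int) : Prop := out = solution_alt a
instance (a : List Int) (out : Int) : Decidable (Spec_solution a out) := by unfold Spec_solution; infer_instance

-- ===== CLAIM (what is proved, stated in full; the proofs are below) =====
def Claim_equal_solution : Prop := ∀ (a : List Int), Dom_solution a → Spec_solution a (solution a)


-- ===== LEMMAS AND PROOFS =====

-- running minimum of a list, seeded with m
def runMin (m : Int) (xs : List Int) : Int := xs.foldl min m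

-- minimum of a[0..j-1]  (j ≥ 1)
def pmv (a : List Int) (j : Nat) : Int := runMin (a.headD 0) ((a.drop 1).take (j-1))

-- minimum of a[j+1..len-1]  (j ≤ len-2)
def smv (a : List Int) (j : Nat) : Int :=
  runMin (a.reverse.headD 0) ((a.reverse.drop 1).take (a.length - 2 - j))

-- contents of A's left_min / right_min arrays after processing range(2, k)
def LA (a : List Int) (k : Nat) : List Int :=
  (List.range a.length).map (fun j => if 1 ≤ j ∧ j < k then pmv a j else 0)
def RA (a : List Int) (k : Nat) : List Int :=
  (List.range a.length).map (fun j => if a.length - k ≤ j ∧ j ≤ a.length - 2 then smv a j else 0)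

lemma runMin_append (m x : Int) (xs : List Int) : runMin m (xs ++ [x]) = min (runMin m xs) x := by
  simp [runMin]

lemma runMin_append' (m : Int) (xs ys : List Int) : runMin m (xs ++ ys) = runMin (runMin m xs) ys := by
  simp [runMin]

lemma runMin_swap (xs : List Int) : ∀ (m x : Int), runMin (min m x) xs = min (runMin m xs) x := by
  induction xs with
  | nil => intro m x; rfl
  | cons y ys ih =>
    intro m x
    show runMin (min (min m x) y) ys = min (runMin (min m y) ys) x
    rw [show min (min m x) y = min (min m y) x by rw [min_assoc, min_assoc, min_comm x y], ih]

lemma runMin_min_comm (m n : Int) (xs : List Int) :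
    min (runMin m xs) n = min (runMin n xs) m := by
  rw [← runMin_swap, min_comm m n, runMin_swap]

lemma runMin_reverse (xs : List Int) : ∀ (m : Int), runMin m xs.reverse = runMin m xs := by
  induction xs with
  | nil => intro m; rfl
  | cons y ys ih =>
    intro m
    rw [List.reverse_cons, runMin_append, ih]
    show _ = runMin (min m y) ys
    rw [runMin_swap]

lemma headD_eq_getD (xs : List Int) (d : Int) : xs.headD d = xs.getD 0 d := by
  cases xs <;> rfl

lemma revHeadD (a : List Int) (h : a ≠ []) (d : Int) :
    a.reverse.headD d = a.getD (a.length - 1) d := by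
  have hl : 0 < a.length := List.length_pos_of_ne_nil h
  rw [headD_eq_getD, List.getD_eq_getElem _ _ (by simpa using hl),
      List.getD_eq_getElem _ _ (by omega), List.getElem_reverse]
  simp

lemma pmv_one (a : List Int) : pmv a 1 = a.headD 0 := by
  simp [pmv, runMin]

lemma pmv_succ (a : List Int) (j : Nat) (h1 : 1 ≤ j) (h2 : j < a.length) :
    pmv a (j+1) = min (pmv a j) (a.getD j 0) := by
  have hd : (a.drop 1).length = a.length - 1 := by simp
  have hlen : j - 1 < (a.drop 1).length := by omega
  have hj : j = (j - 1) + 1 := by omega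
  have hget : (a.drop 1)[j-1]'hlen = a[j]'h2 := by
    rw [List.getElem_drop]; congr 1; omega
  have htake : (a.drop 1).take j = (a.drop 1).take (j-1) ++ [a[j]'h2] := by
    conv_lhs => rw [hj]
    rw [List.take_succ, List.getElem?_eq_getElem hlen, hget]; rfl
  unfold pmv
  rw [Nat.add_sub_cancel, htake, runMin_append, List.getD_eq_getElem _ _ h2]

lemma smv_last (a : List Int) : smv a (a.length - 2) = a.reverse.headD 0 := by
  simp [smv, runMin]

lemma smv_pred (a : List Int) (j : Nat) (h1 : 1 ≤ j) (h2 : j ≤ a.length - 2)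
    (h3 : 3 ≤ a.length) :
    smv a (j-1) = min (smv a j) (a.getD j 0) := by
  have hd : (a.reverse.drop 1).length = a.length - 1 := by simp
  have hlen : a.length - 2 - j < (a.reverse.drop 1).length := by omega
  have hjl : j < a.length := by omega
  have hget : (a.reverse.drop 1)[a.length - 2 - j]'hlen = a[j]'hjl := by
    rw [List.getElem_drop, List.getElem_reverse]; congr 1; omega
  unfold smv
  rw [show a.length - 2 - (j-1) = (a.length - 2 - j) + 1 by omega,
      List.take_succ, List.getElem?_eq_getElem hlen, hget]
  show runMin _ (_ ++ [_]) = _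
  rw [runMin_append, List.getD_eq_getElem _ _ hjl]

-- negative-index write, as A's right_min[-i-1] uses it
lemma pySetD_neg (xs : List Int) (k : Nat) (v : Int) (h0 : 0 < k) (hk : k ≤ xs.length) :
    PySem.List.pySetD xs (-(k:Int)) v = xs.set (xs.length - k) v := by
  simp only [PySem.List.pySetD, PySem.List.pySet?, PySem.List.pyIdx?]
  rw [if_neg (by omega), if_pos (by omega)]
  simp

lemma init_left (a : List Int) (hl : 4 ≤ a.length) :
    PySem.List.pySetD (List.replicate a.length (0:Int)) 1 (PySem.List.pyGetD a 0 0) = LA a 2 := by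
  rw [show (1:Int) = ((1:Nat):Int) by norm_num, PySem.List.pySetD_natCast,
      PySem.List.pyGetD_zero]
  apply List.ext_getElem (by simp [LA])
  intro j hj1 hj2
  have hjl : j < a.length := by simp [LA] at hj2; omega
  rw [List.getElem_set]
  simp only [LA, List.getElem_map, List.getElem_range]
  by_cases hj : (1:Nat) = j
  · rw [if_pos hj, if_pos (by omega)]
    rw [show j = 1 by omega]
    rw [pmv_one, headD_eq_getD]
  · rw [if_neg hj, if_neg (by omega), List.getElem_replicate]

lemma init_right (a : List Int) (hl : 4 ≤ a.length) :
    PySem.List.pySetD (List.replicate a.length (0:Int)) (-2) (PySem.List.pyGetD a (-1) 0) = RA a 2 := by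
  have hrep : (List.replicate a.length (0:Int)).length = a.length := by simp
  rw [show (-2:Int) = -((2:Nat):Int) by norm_num,
      pySetD_neg _ _ _ (by norm_num) (by rw [hrep]; omega),
      show (-1:Int) = -((1:Nat):Int) by norm_num,
      PySem.List.pyGetD_neg_natCast a 1 0 (by norm_num) (by omega), hrep]
  apply List.ext_getElem (by simp [RA])
  intro j hj1 hj2
  have hjl : j < a.length := by simp [RA] at hj2; omega
  rw [List.getElem_set]
  simp only [RA, List.getElem_map, List.getElem_range]
  by_cases hj : a.length - 2 = j
  · rw [if_pos hj, if_pos (by omega)]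
    rw [show j = a.length - 2 by omega]
    rw [smv_last, revHeadD a (by intro h; simp [h] at hl) 0,
        List.getD_eq_getElem _ _ (by omega)]
  · rw [if_neg hj, if_neg (by omega), List.getElem_replicate]

lemma stepA (a : List Int) (hl : 4 ≤ a.length) (k : Nat) (h2 : 2 ≤ k) (hk : k ≤ a.length - 2) :
    ((fun (st : List Int × List Int) (i : Int) =>
        (PySem.List.pySetD st.1 i (min (PySem.List.pyGetD a (i-1) 0) (PySem.List.pyGetD st.1 (i-1) 0)),
         PySem.List.pySetD st.2 (-i-1) (min (PySem.List.pyGetD a (-i) 0) (PySem.List.pyGetD st.2 (-i) 0))))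
      (LA a k, RA a k) (k:Int)) = (LA a (k+1), RA a (k+1)) := by
  have hLAlen : (LA a k).length = a.length := by simp [LA]
  have hRAlen : (RA a k).length = a.length := by simp [RA]
  refine Prod.ext ?_ ?_
  · show PySem.List.pySetD (LA a k) (k:Int)
        (min (PySem.List.pyGetD a ((k:Int)-1) 0) (PySem.List.pyGetD (LA a k) ((k:Int)-1) 0)) = LA a (k+1)
    rw [show ((k:Int)-1) = (((k-1:Nat)):Int) by omega,
        PySem.List.pySetD_natCast, PySem.List.pyGetD_natCast, PySem.List.pyGetD_natCast]
    have hgd : (LA a k).getD (k-1) 0 = pmv a (k-1) := by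
      unfold LA
      rw [PySem.List.getD_map_range _ _ _ _ (by omega), if_pos ⟨by omega, by omega⟩]
    have hmin : min (a.getD (k-1) 0) (pmv a (k-1)) = pmv a k := by
      have h := pmv_succ a (k-1) (by omega) (by omega)
      rw [show (k-1)+1 = k by omega] at h
      rw [h, min_comm]
    rw [hgd, hmin]
    apply List.ext_getElem (by simp [LA])
    intro j hj1 hj2
    have hjl : j < a.length := by simp [LA] at hj2; omega
    rw [List.getElem_set]
    simp only [LA, List.getElem_map, List.getElem_range]
    by_cases hj : k = j
    · rw [if_pos hj, if_pos (by omega), ← hj]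
    · rw [if_neg hj]
      by_cases hc : 1 ≤ j ∧ j < k
      · rw [if_pos hc, if_pos ⟨hc.1, by omega⟩]
      · rw [if_neg hc, if_neg (by omega)]
  · show PySem.List.pySetD (RA a k) (-(k:Int)-1)
        (min (PySem.List.pyGetD a (-(k:Int)) 0) (PySem.List.pyGetD (RA a k) (-(k:Int)) 0)) = RA a (k+1)
    rw [show (-(k:Int)-1) = -(((k+1:Nat)):Int) by push_cast; ring,
        pySetD_neg _ _ _ (by omega) (by rw [hRAlen]; omega),
        PySem.List.pyGetD_neg_natCast a k 0 (by omega) (by omega), hRAlen]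
    have hgd : PySem.List.pyGetD (RA a k) (-(k:Int)) 0 = smv a (a.length - k) := by
      rw [PySem.List.pyGetD_neg_natCast _ k _ (by omega) (by rw [hRAlen]; omega)]
      simp only [RA, List.length_map, List.length_range, List.getElem_map, List.getElem_range]
      rw [if_pos ⟨le_refl _, by omega⟩]
    have hmin : min (a[a.length - k]'(by omega)) (smv a (a.length - k)) = smv a (a.length - (k+1)) := by
      have h := smv_pred a (a.length - k) (by omega) (by omega) (by omega)
      rw [show a.length - k - 1 = a.length - (k+1) by omega,
          List.getD_eq_getElem _ _ (by omega : a.length - k < a.length)] at h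
      rw [h, min_comm]
    rw [hgd, hmin]
    apply List.ext_getElem (by simp [RA])
    intro j hj1 hj2
    have hjl : j < a.length := by simp [RA] at hj2; omega
    rw [List.getElem_set]
    simp only [RA, List.getElem_map, List.getElem_range]
    by_cases hj : a.length - (k+1) = j
    · rw [if_pos hj, if_pos (by omega), ← hj]
    · rw [if_neg hj]
      by_cases hc : a.length - k ≤ j ∧ j ≤ a.length - 2
      · rw [if_pos hc, if_pos ⟨by omega, hc.2⟩]
      · rw [if_neg hc, if_neg (by omega)]

def Qp (a : List Int) (t : Nat) : Bool :=
  decide (a.getD (1+t) 0 ≤ pmv a (1+t)) || decide (a.getD (1+t) 0 ≤ smv a (1+t))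

lemma foldA' (a : List Int) (hl : 4 ≤ a.length) (k : Nat) (h2 : 2 ≤ k) (hk : k ≤ a.length - 1) :
    (PySem.List.pyRange 2 (k:Int) 1).foldl
      (fun (st : List Int × List Int) (i : Int) =>
        (PySem.List.pySetD st.1 i (min (PySem.List.pyGetD a (i-1) 0) (PySem.List.pyGetD st.1 (i-1) 0)),
         PySem.List.pySetD st.2 (-i-1) (min (PySem.List.pyGetD a (-i) 0) (PySem.List.pyGetD st.2 (-i) 0))))
      (LA a 2, RA a 2) = (LA a k, RA a k) := by
  induction k with
  | zero => omega
  | succ k ih =>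
    by_cases hk2 : k < 2
    · have : k = 1 := by omega
      subst this
      rw [show ((1+1 : Nat) : Int) = 2 by norm_num, PySem.List.pyRange_one_eq_nil (by omega)]
      rfl
    · push_neg at hk2
      rw [show (((k+1 : Nat)) : Int) = (k:Int) + 1 by push_cast; ring,
          PySem.List.pyRange_one_succ_right (by exact_mod_cast (by omega : (2:Int) ≤ (k:Int))),
          List.foldl_append, ih hk2 (by omega)]
      exact stepA a hl k hk2 (by omega)

def stRes (a : List Int) : List Int × List Int :=
  List.foldl (fun (st : List Int × List Int) (i : Int) =>
      (PySem.List.pySetD st.1 i (min (PySem.List.pyGetD a (i-1) 0) (PySem.List.pyGetD st.1 (i-1) 0)),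
       PySem.List.pySetD st.2 (-i-1) (min (PySem.List.pyGetD a (-i) 0) (PySem.List.pyGetD st.2 (-i) 0))))
    (PySem.List.pySetD (List.replicate a.length 0) 1 (PySem.List.pyGetD a 0 0),
     PySem.List.pySetD (List.replicate a.length 0) (-2) (PySem.List.pyGetD a (-1) 0))
    (PySem.List.pyRange 2 ((a.length:Int) - 1) 1)

lemma sol_eq (a : List Int) : solution a =
    (if (a.length:Int) ≤ 3 then (a.length:Int)
     else
       List.foldl (fun (ans : Int) (i : Int) =>
         if PySem.List.pyGetD a i 0 > PySem.List.pyGetD (stRes a).1 i 0 ∧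
            PySem.List.pyGetD a i 0 > PySem.List.pyGetD (stRes a).2 i 0 then ans else ans + 1)
         2 (PySem.List.pyRange 1 ((a.length:Int) - 1) 1)) := rfl

lemma stRes_eq (a : List Int) (hl : 4 ≤ a.length) :
    stRes a = (LA a (a.length - 1), RA a (a.length - 1)) := by
  unfold stRes
  rw [init_left a hl, init_right a hl,
      show ((a.length:Int) - 1) = (((a.length - 1 : Nat)):Int) by omega,
      foldA' a hl (a.length - 1) (by omega) (le_refl _)]

lemma A_count (a : List Int) (hl : 4 ≤ a.length) :
    solution a = 2 + ((List.range (a.length - 2)).countP (Qp a) : Int) := by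
  rw [sol_eq, if_neg (by push_cast; omega), stRes_eq a hl]
  dsimp only
  rw [PySem.List.foldl_congr_mem _ _
      (fun (ans : Int) (i : Int) =>
        if a.getD i.toNat 0 ≤ pmv a i.toNat ∨ a.getD i.toNat 0 ≤ smv a i.toNat then ans + 1 else ans) 2
      ?_]
  · rw [PySem.List.foldl_ite_add_one
        (fun (i : Int) => a.getD i.toNat 0 ≤ pmv a i.toNat ∨ a.getD i.toNat 0 ≤ smv a i.toNat)]
    congr 1
    rw [PySem.List.pyRange_one, List.countP_map,
        show ((a.length:Int) - 1 - 1).toNat = a.length - 2 by omega]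
    norm_cast
    apply List.countP_congr
    intro t ht
    rw [List.mem_range] at ht
    simp only [Function.comp_apply, Qp,
        show ((1:Int) + (t:Int)).toNat = 1 + t by omega]
    constructor
    · intro h; simp at h ⊢; tauto
    · intro h; simp at h ⊢; tauto
  · intro acc i hi
    rw [PySem.List.mem_pyRange_one] at hi
    have hin : i = ((i.toNat : Nat) : Int) := by omega
    have hnl : i.toNat < a.length := by omega
    have hL : (LA a (a.length-1)).getD i.toNat 0 = pmv a i.toNat := by
      unfold LA; rw [PySem.List.getD_map_range _ _ _ _ hnl, if_pos ⟨by omega, by omega⟩]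
    have hR : (RA a (a.length-1)).getD i.toNat 0 = smv a i.toNat := by
      unfold RA; rw [PySem.List.getD_map_range _ _ _ _ hnl, if_pos ⟨by omega, by omega⟩]
    rw [hin, PySem.List.pyGetD_natCast, PySem.List.pyGetD_natCast, PySem.List.pyGetD_natCast,
        hL, hR]
    dsimp only
    simp only [Int.toNat_natCast]
    by_cases h : a.getD i.toNat 0 ≤ pmv a i.toNat ∨ a.getD i.toNat 0 ≤ smv a i.toNat
    · rw [if_neg (by omega), if_pos h]
    · rw [if_pos (by omega), if_neg h]

-- ==== B-side lemmas ====

-- B's counting loop: counter = number of weak running minima, state = running minimum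
lemma cnt_char (b : List Int) : ∀ (c m : Int),
    b.foldl (fun (st : Int × Int) x => if x ≤ st.2 then (st.1 + 1, x) else st) (c, m)
    = (c + ((List.range b.length).countP
        (fun i => decide (b.getD i 0 ≤ runMin m (b.take i))) : Int), runMin m b) := by
  induction b with
  | nil => intro c m; simp [runMin]
  | cons x xs ih =>
    intro c m
    rw [List.foldl_cons]
    have hst : (if x ≤ m then (c + 1, x) else (c, m))
        = (c + (if decide (x ≤ m) then (1:Int) else 0), min m x) := by
      by_cases h : x ≤ m
      · rw [if_pos h]; simp [h, min_eq_right h]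
      · rw [if_neg h]; simp [h, min_eq_left (by omega : m ≤ x)]
    rw [hst, ih]
    refine Prod.ext ?_ ?_
    · show _ + _ + _ = c + _
      rw [show (x :: xs).length = xs.length + 1 by simp, List.range_succ_eq_map,
          List.countP_cons, List.countP_map]
      have hcs : ((fun i => decide ((x :: xs).getD i 0 ≤ runMin m ((x :: xs).take i))) ∘ Nat.succ)
          = (fun i => decide (xs.getD i 0 ≤ runMin (min m x) (xs.take i))) := by
        funext i
        simp only [Function.comp_apply, List.getD_cons_succ, List.take_succ_cons]
        rfl
      rw [hcs]
      simp only [List.getD_cons_zero, List.take_zero]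
      have hrm : runMin m ([] : List Int) = m := rfl
      rw [hrm]
      by_cases h : x ≤ m <;> simp [h] <;> push_cast <;> ring
    · show runMin (min m x) xs = runMin m (x :: xs)
      rfl

-- position-count over the reverse = suffix-min count over the original
lemma cnt_rev (xs : List Int) : ∀ (m : Int),
    (List.range xs.length).countP
        (fun i => decide (xs.reverse.getD i 0 ≤ runMin m (xs.reverse.take i)))
    = (List.range xs.length).countP
        (fun i => decide (xs.getD i 0 ≤ runMin m (xs.drop (i+1)))) := by
  induction xs using List.reverseRecOn with
  | nil => intro m; simp
  | append_singleton qs p ih =>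
    intro m
    have hrev : (qs ++ [p]).reverse = p :: qs.reverse := by simp
    have hlen : (qs ++ [p]).length = qs.length + 1 := by simp
    have hrm : runMin m ([] : List Int) = m := rfl
    have hLHS : (List.range (qs ++ [p]).length).countP
          (fun i => decide ((qs ++ [p]).reverse.getD i 0 ≤ runMin m ((qs ++ [p]).reverse.take i)))
        = (if decide (p ≤ m) then 1 else 0)
          + (List.range qs.length).countP
            (fun i => decide (qs.getD i 0 ≤ runMin (min m p) (qs.drop (i+1)))) := by
      rw [hlen, List.range_succ_eq_map, List.countP_cons, List.countP_map]
      have hcs : ((fun i => decide ((qs ++ [p]).reverse.getD i 0 ≤ runMin m ((qs ++ [p]).reverse.take i))) ∘ Nat.succ)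
          = (fun i => decide (qs.reverse.getD i 0 ≤ runMin (min m p) (qs.reverse.take i))) := by
        funext i
        rw [hrev]
        simp only [Function.comp_apply, List.getD_cons_succ, List.take_succ_cons]
        rfl
      rw [hcs, ih (min m p)]
      simp only [hrev, List.getD_cons_zero, List.take_zero]
      rw [hrm]
      omega
    have hRHS : (List.range (qs ++ [p]).length).countP
          (fun i => decide ((qs ++ [p]).getD i 0 ≤ runMin m ((qs ++ [p]).drop (i+1))))
        = (List.range qs.length).countP
            (fun i => decide (qs.getD i 0 ≤ runMin (min m p) (qs.drop (i+1))))
          + (if decide (p ≤ m) then 1 else 0) := by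
      rw [hlen, List.range_succ, List.countP_append, List.countP_singleton]
      have hlast : decide ((qs ++ [p]).getD qs.length 0 ≤ runMin m ((qs ++ [p]).drop (qs.length + 1)))
          = decide (p ≤ m) := by
        have h1 : (qs ++ [p]).getD qs.length 0 = p := by
          rw [List.getD_append_right _ _ _ _ (le_refl _), Nat.sub_self]; rfl
        have h2 : (qs ++ [p]).drop (qs.length + 1) = [] :=
          List.drop_of_length_le (by simp)
        rw [h1, h2]; rfl
      have hcong : (List.range qs.length).countP
            (fun i => decide ((qs ++ [p]).getD i 0 ≤ runMin m ((qs ++ [p]).drop (i+1))))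
          = (List.range qs.length).countP
            (fun i => decide (qs.getD i 0 ≤ runMin (min m p) (qs.drop (i+1)))) := by
        apply List.countP_congr
        intro i hi
        rw [List.mem_range] at hi
        rw [List.getD_append _ _ _ _ hi,
            List.drop_append_of_le_length (by omega),
            runMin_append, ← runMin_swap]
      rw [hlast, hcong]
    rw [hLHS, hRHS]
    omega

-- inclusion-exclusion for countP
lemma countP_or (p q : Nat → Bool) (l : List Nat) :
    ((l.countP (fun x => p x || q x)) : Int)
    = (l.countP p : Int) + (l.countP q : Int) - (l.countP (fun x => p x && q x) : Int) := by
  induction l with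
  | nil => simp
  | cons x xs ih =>
    simp only [List.countP_cons]
    by_cases hp : p x = true <;> by_cases hq : q x = true <;>
      simp [hp, hq] <;> push_cast <;> omega

-- element count as a position count
lemma count_eq_countP_range (xs : List Int) (v : Int) :
    xs.count v = (List.range xs.length).countP (fun i => decide (xs.getD i 0 = v)) := by
  induction xs using List.reverseRecOn with
  | nil => simp
  | append_singleton qs p ih =>
    rw [show (qs ++ [p]).length = qs.length + 1 by simp,
        List.range_succ, List.countP_append, List.countP_singleton,
        List.count_append, List.count_singleton]
    have hlast : decide ((qs ++ [p]).getD qs.length 0 = v) = decide (p = v) := by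
      have h1 : (qs ++ [p]).getD qs.length 0 = p := by
        rw [List.getD_append_right _ _ _ _ (le_refl _), Nat.sub_self]; rfl
      rw [h1]
    have hcong : (List.range qs.length).countP (fun i => decide ((qs ++ [p]).getD i 0 = v))
        = (List.range qs.length).countP (fun i => decide (qs.getD i 0 = v)) := by
      apply List.countP_congr
      intro i hi
      rw [List.mem_range] at hi
      rw [List.getD_append _ _ _ _ hi]
    rw [hlast, hcong, ih]
    by_cases h : p = v <;> simp [h]

-- the global minimum, written as the running minimum from the head
def gmin (a : List Int) : Int := runMin (a.headD 0) (a.drop 1)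

lemma min?_eq_gmin (a : List Int) (h : a ≠ []) :
    (PySem.List.min? a (fun y => y)).getD 0 = gmin a := by
  match a, h with
  | x :: t, _ =>
    rw [PySem.List.min?_id_cons]
    rfl

-- split of the global minimum at an interior index j
lemma gmin_split (a : List Int) (hl : 4 ≤ a.length) (j : Nat) (h1 : 1 ≤ j) (h2 : j ≤ a.length - 2) :
    gmin a = min (pmv a j) (min (a.getD j 0) (smv a j)) := by
  have hjl : j < a.length := by omega
  have hd : (a.drop 1).length = a.length - 1 := by simp
  -- smv as a forward running minimum over Q := (a.take (a.length-1)).drop (j+1), seeded with the last element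
  have hrev1 : a.reverse.drop 1 = (a.take (a.length - 1)).reverse := by
    rw [List.drop_reverse]
  have hQ : (a.reverse.drop 1).take (a.length - 2 - j)
      = ((a.take (a.length - 1)).drop (j+1)).reverse := by
    rw [hrev1, List.take_reverse,
        show (a.take (a.length-1)).length - (a.length - 2 - j) = j + 1 by simp; omega]
  have hsmv : smv a j = runMin (a.reverse.headD 0) ((a.take (a.length - 1)).drop (j+1)) := by
    unfold smv
    rw [hQ, runMin_reverse]
  -- decompose a.drop 1
  have hsplit : a.drop 1 = (a.drop 1).take (j-1)
      ++ ([a.getD j 0] ++ ((a.take (a.length - 1)).drop (j+1) ++ [a.getD (a.length - 1) 0])) := by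
    have h3 : (a.drop 1).drop (j-1) = a.drop j := by
      rw [List.drop_drop]; congr 1; omega
    have h4 : a.drop j = a.getD j 0 :: a.drop (j+1) := by
      rw [List.getD_eq_getElem _ _ hjl, List.drop_eq_getElem_cons hjl]
    have h5 : a.drop (j+1) = (a.take (a.length - 1)).drop (j+1) ++ [a.getD (a.length - 1) 0] := by
      have h7 : a.drop (a.length - 1) = [a.getD (a.length - 1) 0] := by
        rw [List.getD_eq_getElem _ _ (by omega), List.drop_eq_getElem_cons (by omega),
            List.drop_of_length_le (by omega : a.length ≤ a.length - 1 + 1)]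
      have h6 : a = a.take (a.length - 1) ++ [a.getD (a.length - 1) 0] := by
        conv_lhs => rw [← List.take_append_drop (a.length - 1) a]
        rw [h7]
      conv_lhs => rw [h6]
      rw [List.drop_append_of_le_length (by simp; omega)]
    conv_lhs => rw [← List.take_append_drop (j-1) (a.drop 1), h3, h4, h5]
    simp
  have hlast : a.reverse.headD 0 = a.getD (a.length - 1) 0 :=
    revHeadD a (by intro h; simp [h] at hl) 0
  unfold gmin
  conv_lhs => rw [hsplit]
  rw [runMin_append', runMin_append']
  show runMin (runMin (pmv a j) [a.getD j 0]) _ = _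
  have hstep : runMin (pmv a j) [a.getD j 0] = min (pmv a j) (a.getD j 0) := by
    simp [runMin]
  rw [hstep, runMin_append, min_comm (pmv a j) (a.getD j 0), runMin_swap]
  have hz := runMin_min_comm (a.getD j 0) (a.getD (a.length - 1) 0)
      ((a.take (a.length - 1)).drop (j+1))
  rw [hlast] at hsmv
  omega

-- both sides ↔ equal to the global minimum
lemma both_iff_gmin (a : List Int) (hl : 4 ≤ a.length) (j : Nat) (h1 : 1 ≤ j) (h2 : j ≤ a.length - 2) :
    ((a.getD j 0 ≤ pmv a j ∧ a.getD j 0 ≤ smv a j) ↔ a.getD j 0 = gmin a) := by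
  have h := gmin_split a hl j h1 h2
  omega

def midD (a : List Int) : List Int := PySem.List.slice a (some 1) (some (-1))

lemma hmid (a : List Int) (hl : 4 ≤ a.length) :
    midD a = (a.drop 1).take (a.length - 2) := by
  unfold midD
  simp only [PySem.List.slice, PySem.List.clampIdx]
  rw [if_pos (by norm_num : (-1:Int) < 0), if_neg (by omega : ¬((a.length:Int) + (-1) < 0)),
      if_neg (by norm_num : ¬((1:Int) < 0)),
      show ((a.length:Int) + (-1)).toNat = a.length - 1 by omega,
      show min (1:Int).toNat a.length = 1 by omega,
      show a.length - 1 - 1 = a.length - 2 by omega]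

lemma solB_eq (a : List Int) : solution_alt a =
    (if (a.length:Int) ≤ 3 then (a.length:Int)
     else
       2 + ((midD a).foldl (fun (st : Int × Int) x =>
              if x ≤ st.2 then (st.1 + 1, x) else st) (0, PySem.List.pyGetD a 0 0)).1
         + ((midD a).reverse.foldl (fun (st : Int × Int) x =>
              if x ≤ st.2 then (st.1 + 1, x) else st) (0, PySem.List.pyGetD a (-1) 0)).1
         - ((PySem.List.count (midD a) ((PySem.List.min? a (fun y => y)).getD 0)) : Int)) := rfl

lemma B_count (a : List Int) (hl : 4 ≤ a.length) :
    solution_alt a = 2 + ((List.range (a.length - 2)).countP (Qp a) : Int) := by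
  rw [solB_eq, if_neg (by push_cast; omega)]
  have hb := hmid a hl
  have hbl : (midD a).length = a.length - 2 := by rw [hb]; simp; omega
  have hL0 : PySem.List.pyGetD a 0 0 = a.headD 0 := by
    rw [PySem.List.pyGetD_zero, headD_eq_getD]
  have hR0 : PySem.List.pyGetD a (-1) 0 = a.reverse.headD 0 := by
    rw [show (-1:Int) = -((1:Nat):Int) by norm_num,
        PySem.List.pyGetD_neg_natCast a 1 0 (by norm_num) (by omega),
        revHeadD a (by intro h; simp [h] at hl) 0,
        List.getD_eq_getElem _ _ (by omega)]
  -- interior element access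
  have hbiD : ∀ t, t < a.length - 2 → (midD a).getD t 0 = a.getD (1+t) 0 := by
    intro t ht
    have hib : t < (midD a).length := by omega
    rw [hb, List.getD_eq_getElem _ _ (by rw [← hb]; exact hib),
        List.getElem_take, List.getElem_drop, List.getD_eq_getElem _ _ (by omega)]
  -- prefix mins
  have hpm : ∀ t, t < a.length - 2 →
      runMin (PySem.List.pyGetD a 0 0) ((midD a).take t) = pmv a (1+t) := by
    intro t ht
    rw [hL0, hb, List.take_take, show min t (a.length - 2) = t by omega]
    unfold pmv
    rw [show 1 + t - 1 = t by omega]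
  -- suffix mins
  have hsm : ∀ t, t < a.length - 2 →
      runMin (PySem.List.pyGetD a (-1) 0) ((midD a).drop (t+1)) = smv a (1+t) := by
    intro t ht
    rw [hR0, hb]
    unfold smv
    rw [List.drop_take, List.drop_drop,
        show (1:Nat) + (t+1) = t + 2 by omega,
        List.drop_reverse, List.take_reverse,
        show (a.take (a.length-1)).length - (a.length - 2 - (1+t)) = t + 2 by simp; omega,
        List.drop_take, runMin_reverse,
        show a.length - 1 - (t+2) = a.length - 2 - (1+t) by omega,
        show a.length - 2 - (t+1) = a.length - 2 - (1+t) by omega]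
  -- the three counts
  rw [cnt_char, cnt_char]
  dsimp only
  rw [List.length_reverse, cnt_rev, PySem.List.count_eq, count_eq_countP_range, hbl]
  have hmina : (PySem.List.min? a (fun y => y)).getD 0 = gmin a :=
    min?_eq_gmin a (by intro h; simp [h] at hl)
  have hLc : (List.range (a.length - 2)).countP
        (fun i => decide ((midD a).getD i 0 ≤ runMin (PySem.List.pyGetD a 0 0) ((midD a).take i)))
      = (List.range (a.length - 2)).countP (fun t => decide (a.getD (1+t) 0 ≤ pmv a (1+t))) := by
    apply List.countP_congr
    intro t ht
    rw [List.mem_range] at ht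
    rw [hbiD t ht, hpm t ht]
  have hRc : (List.range (a.length - 2)).countP
        (fun i => decide ((midD a).getD i 0 ≤ runMin (PySem.List.pyGetD a (-1) 0) ((midD a).drop (i+1))))
      = (List.range (a.length - 2)).countP (fun t => decide (a.getD (1+t) 0 ≤ smv a (1+t))) := by
    apply List.countP_congr
    intro t ht
    rw [List.mem_range] at ht
    rw [hbiD t ht, hsm t ht]
  have hBc : (List.range (a.length - 2)).countP
        (fun i => decide ((midD a).getD i 0 = (PySem.List.min? a (fun y => y)).getD 0))
      = (List.range (a.length - 2)).countP
        (fun t => decide (a.getD (1+t) 0 ≤ pmv a (1+t)) && decide (a.getD (1+t) 0 ≤ smv a (1+t))) := by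
    apply List.countP_congr
    intro t ht
    rw [List.mem_range] at ht
    rw [hbiD t ht, hmina]
    have h := both_iff_gmin a hl (1+t) (by omega) (by omega)
    constructor
    · intro hh; simp at hh ⊢; exact h.mpr hh
    · intro hh; simp at hh ⊢; exact h.mp ⟨hh.1, hh.2⟩
  rw [hLc, hRc, hBc]
  have hIE := countP_or (fun t => decide (a.getD (1+t) 0 ≤ pmv a (1+t)))
      (fun t => decide (a.getD (1+t) 0 ≤ smv a (1+t))) (List.range (a.length - 2))
  unfold Qp
  omega

-- ===== VERDICT (by name: the statement is the Claim_ definition above) =====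
theorem solution_spec : Claim_equal_solution := by
  intro a _
  unfold Spec_solution
  by_cases hl : a.length ≤ 3
  · rw [sol_eq, solB_eq, if_pos (by exact_mod_cast hl), if_pos (by exact_mod_cast hl)]
  · rw [A_count a (by omega), B_count a (by omega)]
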